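-- pv_equiv track=rewrite | github.com/tachyon-beep/elspeth | src/elspeth/plugins/transforms/keyword_filter.py | _nested_repetition_detected
-- ===== SOURCE A (Python) =====
-- def _brace_quantifier_end(pattern: str, start: int) -> int | None:
--     """Return the exclusive end offset for a valid brace quantifier."""
--     if start >= len(pattern) or pattern[start] != "{":
--         return None
--
--     i = start + 1
--     digits_start = i
--     while i < len(pattern) and pattern[i].isdigit():
--         i += 1
--     if i == digits_start:
--         return None
--
--     if i < len(pattern) and pattern[i] == "}":
--         return i + 1
--
--     if i >= len(pattern) or pattern[i] != ",":
--         return None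
--     i += 1
--
--     while i < len(pattern) and pattern[i].isdigit():
--         i += 1
--     if i < len(pattern) and pattern[i] == "}":
--         return i + 1
--     return None
--
-- def _nested_repetition_detected(pattern: str) -> bool:
--     """Detect nested repeated groups with escape and character-class awareness."""
--     group_contains_repetition: list[bool] = []
--     ignore_quantifier_positions: set[int] = set()
--     i = 0
--
--     while i < len(pattern):
--         if i in ignore_quantifier_positions:
--             i += 1
--             continue
--
--         ch = pattern[i]
--
--         if ch == "\\":
--             i += 2
--             continue
--
--         if ch == "[":
--             i += 1
--             while i < len(pattern):
--                 if pattern[i] == "\\":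
--                     i += 2
--                     continue
--                 if pattern[i] == "]":
--                     i += 1
--                     break
--                 i += 1
--             continue
--
--         if ch == "(":
--             group_contains_repetition.append(False)
--             if i + 1 < len(pattern) and pattern[i + 1] == "?":
--                 ignore_quantifier_positions.add(i + 1)
--             i += 1
--             continue
--
--         if ch == ")":
--             if not group_contains_repetition:
--                 i += 1
--                 continue
--
--             closed_group_contains_repetition = group_contains_repetition.pop()
--             quantifier_end = None
--             if i + 1 < len(pattern):
--                 next_ch = pattern[i + 1]
--                 if next_ch in {"+", "*"}:
--                     quantifier_end = i + 2
--                 elif next_ch == "{":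
--                     quantifier_end = _brace_quantifier_end(pattern, i + 1)
--
--             if quantifier_end is not None and closed_group_contains_repetition:
--                 return True
--
--             quantified_group = quantifier_end is not None
--             if group_contains_repetition and (closed_group_contains_repetition or quantified_group):
--                 group_contains_repetition[-1] = True
--
--             i = quantifier_end if quantifier_end is not None else i + 1
--             continue
--
--         quantifier_end = None
--         if ch in {"+", "*"}:
--             quantifier_end = i + 1
--         elif ch == "{":
--             quantifier_end = _brace_quantifier_end(pattern, i)
--
--         if quantifier_end is not None:
--             if group_contains_repetition:
--                 group_contains_repetition[-1] = True
--             i = quantifier_end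
--             continue
--
--         i += 1
--
--     return False
-- ===== SOURCE B (Python) =====
-- def _nested_repetition_detected(pattern: str) -> bool:
--     """Recursive-descent reimplementation: one parser per group instead of an
--     explicit stack of per-group flags plus an ignore-position set."""
--
--     n = len(pattern)
--
--     def quant_end(i):
--         """Exclusive end of a quantifier (+, * or a valid brace) starting at i, else None."""
--         if i >= n:
--             return None
--         c = pattern[i]
--         if c == "+" or c == "*":
--             return i + 1
--         if c != "{":
--             return None
--         j = i + 1
--         while j < n and pattern[j].isdigit():
--             j += 1
--         if j == i + 1:
--             return None
--         if j < n and pattern[j] == "}":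
--             return j + 1
--         if j >= n or pattern[j] != ",":
--             return None
--         j += 1
--         while j < n and pattern[j].isdigit():
--             j += 1
--         if j < n and pattern[j] == "}":
--             return j + 1
--         return None
--
--     def skip_class(i):
--         """Position just after a character class whose body starts at i."""
--         while i < n:
--             c = pattern[i]
--             if c == "\\":
--                 i += 2
--             elif c == "]":
--                 return i + 1
--             else:
--                 i += 1
--         return i
--
--     FOUND = -2   # nested repetition proved: propagate True to the top immediately
--     EOF = -1     # ran off the end of the pattern
--
--     def group(i, rep):
--         """Parse a group body from position i (just after '(' or '(?').
--
--         Returns (FOUND,), (EOF,) or (end, propagate): end = position after the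
--         group's ')' and its quantifier, propagate = the closed group contained a
--         repetition or was itself quantified."""
--         while i < n:
--             c = pattern[i]
--             if c == "\\":
--                 i += 2
--             elif c == "[":
--                 i = skip_class(i + 1)
--             elif c == "(":
--                 j = i + 2 if i + 1 < n and pattern[i + 1] == "?" else i + 1
--                 res = group(j, False)
--                 if res[0] == FOUND or res[0] == EOF:
--                     return res
--                 i, prop = res
--                 rep = rep or prop
--             elif c == ")":
--                 q = quant_end(i + 1)
--                 if q is not None and rep:
--                     return (FOUND,)
--                 return (q if q is not None else i + 1, rep or q is not None)
--             else:
--                 q = quant_end(i)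
--                 rep = rep or q is not None
--                 i = q if q is not None else i + 1
--         return (EOF,)
--
--     i = 0
--     while i < n:
--         c = pattern[i]
--         if c == "\\":
--             i += 2
--         elif c == "[":
--             i = skip_class(i + 1)
--         elif c == "(":
--             j = i + 2 if i + 1 < n and pattern[i + 1] == "?" else i + 1
--             res = group(j, False)
--             if res[0] == FOUND:
--                 return True
--             if res[0] == EOF:
--                 return False
--             i = res[0]
--         elif c == ")":
--             i += 1  # stray close-paren: nothing to quantify
--         else:
--             q = quant_end(i)
--             i = q if q is not None else i + 1
--     return False
-- ===== Notes on version B (the rewrite author's own statement) =====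
-- stated objective: alternative
-- what changed: Replaces A's single while-loop that maintains an explicit list-stack of per-group repetition flags plus an ignore-position set with a recursive-descent parser: a group() helper parses one group per call (handling escapes, char classes and the question-mark group-prefix skip inline) and returns its end position and propagate flag, which the caller folds into its own flag.
import Mathlib
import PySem

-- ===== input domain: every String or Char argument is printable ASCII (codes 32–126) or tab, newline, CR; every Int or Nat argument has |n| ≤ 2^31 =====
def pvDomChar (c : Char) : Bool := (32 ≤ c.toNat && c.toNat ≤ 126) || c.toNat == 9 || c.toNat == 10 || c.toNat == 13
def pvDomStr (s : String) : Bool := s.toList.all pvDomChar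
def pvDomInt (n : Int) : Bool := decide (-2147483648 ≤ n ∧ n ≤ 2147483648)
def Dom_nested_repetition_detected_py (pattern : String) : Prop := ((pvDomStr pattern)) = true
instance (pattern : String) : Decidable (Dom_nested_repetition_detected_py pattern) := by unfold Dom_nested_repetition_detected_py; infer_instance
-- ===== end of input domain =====

-- B re-implements A's single explicit-stack scan as a recursive-descent parser (one
-- recursive call per group); objective: alternative structure, same exact behaviour.
-- Loops/recursions are ported with a fuel argument (always ≥ length+1-position, a pure
-- totality guard: position strictly advances each step, so the fuel never runs out).

-- ===== PORT A =====
-- while loop scanning digits in _brace_quantifier_end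
def pvDigitsEndA (p : List Char) : Nat → Nat → Nat
  | 0, i => i
  | fuel + 1, i =>
    if i < p.length then
      if (p.getD i ' ').isDigit then pvDigitsEndA p fuel (i + 1) else i
    else i

-- _brace_quantifier_end
def pvBraceEndA (p : List Char) (start : Nat) : Option Nat :=
  if start < p.length ∧ p.getD start ' ' = '{' then
    let i := pvDigitsEndA p (p.length + 1) (start + 1)
    if i = start + 1 then none
    else if i < p.length ∧ p.getD i ' ' = '}' then some (i + 1)
    else if ¬ i < p.length ∨ p.getD i ' ' ≠ ',' then none
    else
      let j := pvDigitsEndA p (p.length + 1) (i + 1)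
      if j < p.length ∧ p.getD j ' ' = '}' then some (j + 1) else none
  else none

-- the inner while loop of the '[' branch (position after the class body starting at i)
def pvClassEndA (p : List Char) : Nat → Nat → Nat
  | 0, i => i
  | fuel + 1, i =>
    if i < p.length then
      if p.getD i ' ' = '\\' then pvClassEndA p fuel (i + 2)
      else if p.getD i ' ' = ']' then i + 1
      else pvClassEndA p fuel (i + 1)
    else i

-- A's quantifier-end computation, written identically in the ')' branch (at i+1) and
-- in the plain-character branch (at i): '+'/'*' one past, '{' via _brace_quantifier_end
def pvQAfterA (p : List Char) (k : Nat) : Option Nat :=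
  if k < p.length then
    let nc := p.getD k ' '
    if nc = '+' ∨ nc = '*' then some (k + 1)
    else if nc = '{' then pvBraceEndA p k
    else none
  else none

-- the main while loop of _nested_repetition_detected; the Python list stack
-- (append/pop/[-1] at the END) is represented head-first: push/pop/top at the HEAD
def pvLoopA (p : List Char) : Nat → Nat → List Bool → PySem.Set Nat → Bool
  | 0, _, _, _ => false
  | fuel + 1, i, stk, ign =>
    if i < p.length then
      if PySem.Set.contains ign i then pvLoopA p fuel (i + 1) stk ign
      else
        let ch := p.getD i ' '
        if ch = '\\' then pvLoopA p fuel (i + 2) stk ign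
        else if ch = '[' then pvLoopA p fuel (pvClassEndA p (p.length + 1) (i + 1)) stk ign
        else if ch = '(' then
          if i + 1 < p.length ∧ p.getD (i + 1) ' ' = '?' then
            pvLoopA p fuel (i + 1) (false :: stk) (PySem.Set.add ign (i + 1))
          else pvLoopA p fuel (i + 1) (false :: stk) ign
        else if ch = ')' then
          match stk with
          | [] => pvLoopA p fuel (i + 1) [] ign
          | top :: rest =>
            let q := pvQAfterA p (i + 1)
            if q.isSome && top then true
            else
              pvLoopA p fuel (q.getD (i + 1))
                (if rest ≠ [] ∧ (top = true ∨ q.isSome = true) then true :: rest.tail else rest)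
                ign
        else
          let q := pvQAfterA p i
          if q.isSome then
            pvLoopA p fuel (q.getD i) (match stk with | [] => [] | _ :: t => true :: t) ign
          else pvLoopA p fuel (i + 1) stk ign
    else false

def nested_repetition_detected_py (pattern : String) : Bool :=
  pvLoopA pattern.toList (pattern.toList.length + 1) 0 [] PySem.Set.empty

-- ===== PORT B =====
-- B's digit-scanning while loop (inside quant_end)
def pvDigitsEndB (p : List Char) : Nat → Nat → Nat
  | 0, j => j
  | fuel + 1, j =>
    if j < p.length then
      if (p.getD j ' ').isDigit then pvDigitsEndB p fuel (j + 1) else j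
    else j

-- B's quant_end helper ('+', '*' or a valid brace quantifier, scanned inline)
def pvQuantEndB (p : List Char) (i : Nat) : Option Nat :=
  if i < p.length then
    let c := p.getD i ' '
    if c = '+' ∨ c = '*' then some (i + 1)
    else if c ≠ '{' then none
    else
      let j := pvDigitsEndB p (p.length + 1) (i + 1)
      if j = i + 1 then none
      else if j < p.length ∧ p.getD j ' ' = '}' then some (j + 1)
      else if ¬ j < p.length ∨ p.getD j ' ' ≠ ',' then none
      else
        let j2 := pvDigitsEndB p (p.length + 1) (j + 1)
        if j2 < p.length ∧ p.getD j2 ' ' = '}' then some (j2 + 1) else none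
  else none

-- B's skip_class helper
def pvSkipClassB (p : List Char) : Nat → Nat → Nat
  | 0, i => i
  | fuel + 1, i =>
    if i < p.length then
      if p.getD i ' ' = '\\' then pvSkipClassB p fuel (i + 2)
      else if p.getD i ' ' = ']' then i + 1
      else pvSkipClassB p fuel (i + 1)
    else i

-- result of B's group(): FOUND, EOF or (end position, propagate flag)
inductive PvGRes : Type
  | found : PvGRes
  | eof : PvGRes
  | closed : Nat → Bool → PvGRes
deriving DecidableEq, Repr

-- B's group(i, rep): parse one group body recursively
def pvGroupB (p : List Char) : Nat → Nat → Bool → PvGRes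
  | 0, _, _ => PvGRes.eof
  | fuel + 1, i, rep =>
    if i < p.length then
      let c := p.getD i ' '
      if c = '\\' then pvGroupB p fuel (i + 2) rep
      else if c = '[' then pvGroupB p fuel (pvSkipClassB p (p.length + 1) (i + 1)) rep
      else if c = '(' then
        match pvGroupB p fuel
            (if i + 1 < p.length ∧ p.getD (i + 1) ' ' = '?' then i + 2 else i + 1) false with
        | PvGRes.found => PvGRes.found
        | PvGRes.eof => PvGRes.eof
        | PvGRes.closed j' prop => pvGroupB p fuel j' (rep || prop)
      else if c = ')' then
        let q := pvQuantEndB p (i + 1)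
        if q.isSome && rep then PvGRes.found
        else PvGRes.closed (q.getD (i + 1)) (rep || q.isSome)
      else
        let q := pvQuantEndB p i
        pvGroupB p fuel (q.getD (i + 1)) (rep || q.isSome)
    else PvGRes.eof

-- B's top-level scan (the final while loop of Source B)
def pvTopB (p : List Char) : Nat → Nat → Bool
  | 0, _ => false
  | fuel + 1, i =>
    if i < p.length then
      let c := p.getD i ' '
      if c = '\\' then pvTopB p fuel (i + 2)
      else if c = '[' then pvTopB p fuel (pvSkipClassB p (p.length + 1) (i + 1))
      else if c = '(' then
        match pvGroupB p fuel
            (if i + 1 < p.length ∧ p.getD (i + 1) ' ' = '?' then i + 2 else i + 1) false with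
        | PvGRes.found => true
        | PvGRes.eof => false
        | PvGRes.closed j _ => pvTopB p fuel j
      else if c = ')' then pvTopB p fuel (i + 1)
      else pvTopB p fuel ((pvQuantEndB p i).getD (i + 1))
    else false

def nested_repetition_detected_py_alt (pattern : String) : Bool :=
  pvTopB pattern.toList (pattern.toList.length + 1) 0

-- ===== PRECONDITION & SPEC =====
def Spec_nested_repetition_detected_py (pattern : String) (out : Bool) : Prop := out = nested_repetition_detected_py_alt pattern
instance (pattern : String) (out : Bool) : Decidable (Spec_nested_repetition_detected_py pattern out) := by unfold Spec_nested_repetition_detected_py; infer_instance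

-- ===== CLAIM (what is proved, stated in full; the proofs are below) =====
def Claim_equal_nested_repetition_detected_py : Prop := ∀ (pattern : String), Dom_nested_repetition_detected_py pattern → Spec_nested_repetition_detected_py pattern (nested_repetition_detected_py pattern)

-- ===== LEMMAS AND PROOFS =====

theorem pvDigitsEndA_ge (p : List Char) : ∀ f i, i ≤ pvDigitsEndA p f i := by
  intro f
  induction f with
  | zero => intro i; rw [pvDigitsEndA]
  | succ f ih =>
    intro i
    rw [pvDigitsEndA]
    split
    · split
      · have := ih (i + 1); omega
      · omega
    · omega

theorem pvBraceEndA_gt (p : List Char) (s j : Nat) (h : pvBraceEndA p s = some j) : s < j := by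
  have h1 := pvDigitsEndA_ge p (p.length + 1) (s + 1)
  have h2 := pvDigitsEndA_ge p (p.length + 1) (pvDigitsEndA p (p.length + 1) (s + 1) + 1)
  unfold pvBraceEndA at h
  dsimp only [] at h
  split_ifs at h <;> first | (injection h with h; omega) | exact absurd h (by simp)

theorem pvQAfterA_gt (p : List Char) (k j : Nat) (h : pvQAfterA p k = some j) : k < j := by
  unfold pvQAfterA at h
  dsimp only [] at h
  split_ifs at h <;>
    first
      | (injection h with h; omega)
      | exact pvBraceEndA_gt p k j h
      | exact absurd h (by simp)

theorem pvQAfterA_getD_gt (p : List Char) (m k d : Nat) (hd : m < d) (hk : m ≤ k) :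
    m < (pvQAfterA p k).getD d := by
  cases hq : pvQAfterA p k with
  | none => simpa [hq] using hd
  | some v => have := pvQAfterA_gt p k v hq; simp only [Option.getD_some]; omega

theorem pvClassEndA_ge (p : List Char) : ∀ f i, i ≤ pvClassEndA p f i := by
  intro f
  induction f with
  | zero => intro i; rw [pvClassEndA]
  | succ f ih =>
    intro i
    rw [pvClassEndA]
    split
    · split
      · have := ih (i + 2); omega
      · split
        · omega
        · have := ih (i + 1); omega
    · omega

theorem pvDigitsEndB_eq (p : List Char) : ∀ f i, pvDigitsEndB p f i = pvDigitsEndA p f i := by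
  intro f
  induction f with
  | zero => intro i; rw [pvDigitsEndB, pvDigitsEndA]
  | succ f ih =>
    intro i
    rw [pvDigitsEndB, pvDigitsEndA]
    split
    · split
      · exact ih (i + 1)
      · rfl
    · rfl

theorem pvSkipClassB_eq (p : List Char) : ∀ f i, pvSkipClassB p f i = pvClassEndA p f i := by
  intro f
  induction f with
  | zero => intro i; rw [pvSkipClassB, pvClassEndA]
  | succ f ih =>
    intro i
    rw [pvSkipClassB, pvClassEndA]
    split
    · split
      · exact ih (i + 2)
      · split
        · rfl
        · exact ih (i + 1)
    · rfl

theorem pvSkipClassB_ge (p : List Char) (f i : Nat) : i ≤ pvSkipClassB p f i := by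
  rw [pvSkipClassB_eq]; exact pvClassEndA_ge p f i

theorem pvQuantEndB_eq (p : List Char) (k : Nat) : pvQuantEndB p k = pvQAfterA p k := by
  unfold pvQuantEndB pvQAfterA pvBraceEndA
  dsimp only []
  simp only [pvDigitsEndB_eq]
  split_ifs <;> first | rfl | tauto

theorem pvQuantEndB_getD_gt (p : List Char) (m k d : Nat) (hd : m < d) (hk : m ≤ k) :
    m < (pvQuantEndB p k).getD d := by
  rw [pvQuantEndB_eq]
  exact pvQAfterA_getD_gt p m k d hd hk

-- a closed group result ends strictly past the scan position
theorem gB_closed_gt (p : List Char) :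
    ∀ f i r j b, pvGroupB p f i r = PvGRes.closed j b → i < j ∧ i < p.length := by
  intro f
  induction f with
  | zero => intro i r j b h; rw [pvGroupB] at h; exact absurd h (by simp)
  | succ f ih =>
    intro i r j b h
    rw [pvGroupB] at h
    by_cases hi : i < p.length
    case neg => rw [if_neg hi] at h; exact absurd h (by simp)
    case pos =>
    rw [if_pos hi] at h
    dsimp only [] at h
    by_cases h1 : p.getD i ' ' = '\\'
    · rw [if_pos h1] at h
      have := ih _ _ _ _ h
      exact ⟨by omega, hi⟩
    rw [if_neg h1] at h
    by_cases h2 : p.getD i ' ' = '['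
    · rw [if_pos h2] at h
      have hsk := pvSkipClassB_ge p (p.length + 1) (i + 1)
      have := ih _ _ _ _ h
      exact ⟨by omega, hi⟩
    rw [if_neg h2] at h
    by_cases h3 : p.getD i ' ' = '('
    · rw [if_pos h3] at h
      cases hsub : pvGroupB p f
          (if i + 1 < p.length ∧ p.getD (i + 1) ' ' = '?' then i + 2 else i + 1) false with
      | found => rw [hsub] at h; exact absurd h (by simp)
      | eof => rw [hsub] at h; exact absurd h (by simp)
      | closed j' prop =>
        rw [hsub] at h
        have hA := ih _ _ _ _ hsub
        have hB := ih _ _ _ _ h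
        refine ⟨?_, hi⟩
        have hj : i < (if i + 1 < p.length ∧ p.getD (i + 1) ' ' = '?' then i + 2 else i + 1) := by
          split <;> omega
        omega
    rw [if_neg h3] at h
    by_cases h4 : p.getD i ' ' = ')'
    · rw [if_pos h4] at h
      by_cases h5 : ((pvQuantEndB p (i + 1)).isSome && r) = true
      · rw [if_pos h5] at h; exact absurd h (by simp)
      · rw [if_neg h5] at h
        injection h with hj _
        have := pvQuantEndB_getD_gt p i (i + 1) (i + 1) (by omega) (by omega)
        exact ⟨by omega, hi⟩
    · rw [if_neg h4] at h
      have := ih _ _ _ _ h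
      have := pvQuantEndB_getD_gt p i i (i + 1) (by omega) (by omega)
      exact ⟨by omega, hi⟩

-- enough fuel: the result does not depend on the exact fuel
theorem gB_fuel (p : List Char) :
    ∀ f g i r, p.length - i < f → p.length - i < g → pvGroupB p f i r = pvGroupB p g i r := by
  intro f
  induction f with
  | zero => intro g i r hf _; omega
  | succ f ih =>
    intro g i r hf hg
    obtain ⟨g2, rfl⟩ : ∃ g2, g = g2 + 1 := ⟨g - 1, by omega⟩
    rw [pvGroupB]
    rw [pvGroupB]
    by_cases hi : i < p.length
    case neg => rw [if_neg hi, if_neg hi]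
    case pos =>
    rw [if_pos hi, if_pos hi]
    dsimp only []
    by_cases h1 : p.getD i ' ' = '\\'
    · rw [if_pos h1, if_pos h1]
      exact ih g2 (i + 2) r (by omega) (by omega)
    rw [if_neg h1, if_neg h1]
    by_cases h2 : p.getD i ' ' = '['
    · rw [if_pos h2, if_pos h2]
      have hsk := pvSkipClassB_ge p (p.length + 1) (i + 1)
      exact ih g2 _ r (by omega) (by omega)
    rw [if_neg h2, if_neg h2]
    by_cases h3 : p.getD i ' ' = '('
    · rw [if_pos h3, if_pos h3]
      have hj : i < (if i + 1 < p.length ∧ p.getD (i + 1) ' ' = '?' then i + 2 else i + 1) := by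
        split <;> omega
      have hsub_eq := ih g2
        (if i + 1 < p.length ∧ p.getD (i + 1) ' ' = '?' then i + 2 else i + 1) false
        (by omega) (by omega)
      rw [← hsub_eq]
      cases hsub : pvGroupB p f
          (if i + 1 < p.length ∧ p.getD (i + 1) ' ' = '?' then i + 2 else i + 1) false with
      | found => rfl
      | eof => rfl
      | closed j' prop =>
        have hb := gB_closed_gt p f _ false j' prop hsub
        exact ih g2 j' (r || prop) (by omega) (by omega)
    rw [if_neg h3, if_neg h3]
    by_cases h4 : p.getD i ' ' = ')'
    · rw [if_pos h4, if_pos h4]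
    · rw [if_neg h4, if_neg h4]
      have := pvQuantEndB_getD_gt p i i (i + 1) (by omega) (by omega)
      exact ih g2 _ _ (by omega) (by omega)

theorem tB_fuel (p : List Char) :
    ∀ f g i, p.length - i < f → p.length - i < g → pvTopB p f i = pvTopB p g i := by
  intro f
  induction f with
  | zero => intro g i hf _; omega
  | succ f ih =>
    intro g i hf hg
    obtain ⟨g2, rfl⟩ : ∃ g2, g = g2 + 1 := ⟨g - 1, by omega⟩
    rw [pvTopB]
    rw [pvTopB]
    by_cases hi : i < p.length
    case neg => rw [if_neg hi, if_neg hi]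
    case pos =>
    rw [if_pos hi, if_pos hi]
    dsimp only []
    by_cases h1 : p.getD i ' ' = '\\'
    · rw [if_pos h1, if_pos h1]
      exact ih g2 (i + 2) (by omega) (by omega)
    rw [if_neg h1, if_neg h1]
    by_cases h2 : p.getD i ' ' = '['
    · rw [if_pos h2, if_pos h2]
      have hsk := pvSkipClassB_ge p (p.length + 1) (i + 1)
      exact ih g2 _ (by omega) (by omega)
    rw [if_neg h2, if_neg h2]
    by_cases h3 : p.getD i ' ' = '('
    · rw [if_pos h3, if_pos h3]
      have hj : i < (if i + 1 < p.length ∧ p.getD (i + 1) ' ' = '?' then i + 2 else i + 1) := by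
        split <;> omega
      have hsub_eq := gB_fuel p f g2
        (if i + 1 < p.length ∧ p.getD (i + 1) ' ' = '?' then i + 2 else i + 1) false
        (by omega) (by omega)
      rw [← hsub_eq]
      cases hsub : pvGroupB p f
          (if i + 1 < p.length ∧ p.getD (i + 1) ' ' = '?' then i + 2 else i + 1) false with
      | found => rfl
      | eof => rfl
      | closed j' prop =>
        have hb := gB_closed_gt p f _ false j' prop hsub
        exact ih g2 j' (by omega) (by omega)
    rw [if_neg h3, if_neg h3]
    by_cases h4 : p.getD i ' ' = ')'
    · rw [if_pos h4, if_pos h4]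
      exact ih g2 (i + 1) (by omega) (by omega)
    · rw [if_neg h4, if_neg h4]
      have := pvQuantEndB_getD_gt p i i (i + 1) (by omega) (by omega)
      exact ih g2 _ (by omega) (by omega)

-- canonical-fuel views of B's two scanners (fuel length+1 always suffices)
def pvGB (p : List Char) (i : Nat) (r : Bool) : PvGRes := pvGroupB p (p.length + 1) i r

def pvTB (p : List Char) (i : Nat) : Bool := pvTopB p (p.length + 1) i

theorem gB_to_canon (p : List Char) (f i : Nat) (r : Bool) (h : p.length - i < f) :
    pvGroupB p f i r = pvGB p i r :=
  gB_fuel p f (p.length + 1) i r h (by omega)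

theorem tB_to_canon (p : List Char) (f i : Nat) (h : p.length - i < f) :
    pvTopB p f i = pvTB p i :=
  tB_fuel p f (p.length + 1) i h (by omega)

theorem pvGB_closed_gt (p : List Char) (i : Nat) (r : Bool) (j : Nat) (b : Bool)
    (h : pvGB p i r = PvGRes.closed j b) : i < j ∧ i < p.length :=
  gB_closed_gt p (p.length + 1) i r j b h

-- one-step unfoldings of B's group parser (canonical fuel)
theorem gB_eof (p : List Char) (i : Nat) (r : Bool) (h : ¬ i < p.length) :
    pvGB p i r = PvGRes.eof := by
  unfold pvGB
  rw [pvGroupB, if_neg h]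

theorem gB_bs (p : List Char) (i : Nat) (r : Bool) (hi : i < p.length)
    (hc : p.getD i ' ' = '\\') : pvGB p i r = pvGB p (i + 2) r := by
  conv_lhs => unfold pvGB
  rw [pvGroupB, if_pos hi]
  dsimp only []
  rw [if_pos hc]
  exact gB_to_canon p p.length (i + 2) r (by omega)

theorem gB_class (p : List Char) (i : Nat) (r : Bool) (hi : i < p.length)
    (hc : p.getD i ' ' = '[') :
    pvGB p i r = pvGB p (pvSkipClassB p (p.length + 1) (i + 1)) r := by
  conv_lhs => unfold pvGB
  rw [pvGroupB, if_pos hi]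
  dsimp only []
  rw [if_neg (by rw [hc]; decide), if_pos hc]
  have := pvSkipClassB_ge p (p.length + 1) (i + 1)
  exact gB_to_canon p p.length _ r (by omega)

theorem gB_open (p : List Char) (i js : Nat) (r : Bool) (hi : i < p.length)
    (hc : p.getD i ' ' = '(')
    (hjs : js = if i + 1 < p.length ∧ p.getD (i + 1) ' ' = '?' then i + 2 else i + 1) :
    pvGB p i r =
      (match pvGB p js false with
       | PvGRes.found => PvGRes.found
       | PvGRes.eof => PvGRes.eof
       | PvGRes.closed j' prop => pvGB p j' (r || prop)) := by
  have hjgt : i < js := by subst hjs; split <;> omega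
  conv_lhs => unfold pvGB
  rw [pvGroupB, if_pos hi]
  dsimp only []
  rw [if_neg (by rw [hc]; decide), if_neg (by rw [hc]; decide), if_pos hc, ← hjs,
    gB_to_canon p p.length js false (by omega)]
  cases hsub : pvGB p js false with
  | found => rfl
  | eof => rfl
  | closed j' prop =>
    have hb := pvGB_closed_gt p js false j' prop hsub
    exact gB_to_canon p p.length j' (r || prop) (by omega)

theorem gB_close_found (p : List Char) (i : Nat) (r : Bool) (hi : i < p.length)
    (hc : p.getD i ' ' = ')') (hq : (pvQuantEndB p (i + 1)).isSome = true) (hr : r = true) :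
    pvGB p i r = PvGRes.found := by
  conv_lhs => unfold pvGB
  rw [pvGroupB, if_pos hi]
  dsimp only []
  rw [if_neg (by rw [hc]; decide), if_neg (by rw [hc]; decide), if_neg (by rw [hc]; decide),
    if_pos hc, if_pos (by subst hr; rw [hq]; decide)]

theorem gB_close (p : List Char) (i : Nat) (r : Bool) (hi : i < p.length)
    (hc : p.getD i ' ' = ')')
    (hq : ¬ (((pvQuantEndB p (i + 1)).isSome && r) = true)) :
    pvGB p i r =
      PvGRes.closed ((pvQuantEndB p (i + 1)).getD (i + 1)) (r || (pvQuantEndB p (i + 1)).isSome) := by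
  conv_lhs => unfold pvGB
  rw [pvGroupB, if_pos hi]
  dsimp only []
  rw [if_neg (by rw [hc]; decide), if_neg (by rw [hc]; decide), if_neg (by rw [hc]; decide),
    if_pos hc, if_neg hq]

theorem gB_other (p : List Char) (i : Nat) (r : Bool) (hi : i < p.length)
    (h1 : p.getD i ' ' ≠ '\\') (h2 : p.getD i ' ' ≠ '[') (h3 : p.getD i ' ' ≠ '(')
    (h4 : p.getD i ' ' ≠ ')') :
    pvGB p i r = pvGB p ((pvQuantEndB p i).getD (i + 1)) (r || (pvQuantEndB p i).isSome) := by
  conv_lhs => unfold pvGB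
  rw [pvGroupB, if_pos hi]
  dsimp only []
  rw [if_neg h1, if_neg h2, if_neg h3, if_neg h4]
  have := pvQuantEndB_getD_gt p i i (i + 1) (by omega) (by omega)
  exact gB_to_canon p p.length _ _ (by omega)

-- one-step unfoldings of B's top-level scan (canonical fuel)
theorem tB_eof (p : List Char) (i : Nat) (h : ¬ i < p.length) : pvTB p i = false := by
  unfold pvTB
  rw [pvTopB, if_neg h]

theorem tB_bs (p : List Char) (i : Nat) (hi : i < p.length) (hc : p.getD i ' ' = '\\') :
    pvTB p i = pvTB p (i + 2) := by
  conv_lhs => unfold pvTB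
  rw [pvTopB, if_pos hi]
  dsimp only []
  rw [if_pos hc]
  exact tB_to_canon p p.length (i + 2) (by omega)

theorem tB_class (p : List Char) (i : Nat) (hi : i < p.length) (hc : p.getD i ' ' = '[') :
    pvTB p i = pvTB p (pvSkipClassB p (p.length + 1) (i + 1)) := by
  conv_lhs => unfold pvTB
  rw [pvTopB, if_pos hi]
  dsimp only []
  rw [if_neg (by rw [hc]; decide), if_pos hc]
  have := pvSkipClassB_ge p (p.length + 1) (i + 1)
  exact tB_to_canon p p.length _ (by omega)

theorem tB_open (p : List Char) (i js : Nat) (hi : i < p.length)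
    (hc : p.getD i ' ' = '(')
    (hjs : js = if i + 1 < p.length ∧ p.getD (i + 1) ' ' = '?' then i + 2 else i + 1) :
    pvTB p i =
      (match pvGB p js false with
       | PvGRes.found => true
       | PvGRes.eof => false
       | PvGRes.closed j _ => pvTB p j) := by
  have hjgt : i < js := by subst hjs; split <;> omega
  conv_lhs => unfold pvTB
  rw [pvTopB, if_pos hi]
  dsimp only []
  rw [if_neg (by rw [hc]; decide), if_neg (by rw [hc]; decide), if_pos hc, ← hjs,
    gB_to_canon p p.length js false (by omega)]
  cases hsub : pvGB p js false with
  | found => rfl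
  | eof => rfl
  | closed j' prop =>
    have hb := pvGB_closed_gt p js false j' prop hsub
    exact tB_to_canon p p.length j' (by omega)

theorem tB_close (p : List Char) (i : Nat) (hi : i < p.length) (hc : p.getD i ' ' = ')') :
    pvTB p i = pvTB p (i + 1) := by
  conv_lhs => unfold pvTB
  rw [pvTopB, if_pos hi]
  dsimp only []
  rw [if_neg (by rw [hc]; decide), if_neg (by rw [hc]; decide), if_neg (by rw [hc]; decide),
    if_pos hc]
  exact tB_to_canon p p.length (i + 1) (by omega)

theorem tB_other (p : List Char) (i : Nat) (hi : i < p.length)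
    (h1 : p.getD i ' ' ≠ '\\') (h2 : p.getD i ' ' ≠ '[') (h3 : p.getD i ' ' ≠ '(')
    (h4 : p.getD i ' ' ≠ ')') :
    pvTB p i = pvTB p ((pvQuantEndB p i).getD (i + 1)) := by
  conv_lhs => unfold pvTB
  rw [pvTopB, if_pos hi]
  dsimp only []
  rw [if_neg h1, if_neg h2, if_neg h3, if_neg h4]
  have := pvQuantEndB_getD_gt p i i (i + 1) (by omega) (by omega)
  exact tB_to_canon p p.length _ (by omega)

-- "set the parent group's flag" update
def pvOrTop (b : Bool) : List Bool → List Bool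
  | [] => []
  | r :: t => (r || b) :: t

-- resuming B's suspended recursion: one pvGB frame per pending Python stack entry
def pvResume (p : List Char) (i : Nat) (s : List Bool) : Bool :=
  match s with
  | [] => pvTB p i
  | r :: rest =>
    match hg : pvGB p i r with
    | PvGRes.found => true
    | PvGRes.eof => false
    | PvGRes.closed j prop => pvResume p j (pvOrTop prop rest)
termination_by p.length - i
decreasing_by have := pvGB_closed_gt p i r j prop hg; omega

theorem resume_nil (p : List Char) (i : Nat) : pvResume p i [] = pvTB p i := by
  rw [pvResume]

theorem resume_cons_found (p : List Char) (i : Nat) (r : Bool) (rest : List Bool)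
    (h : pvGB p i r = PvGRes.found) : pvResume p i (r :: rest) = true := by
  rw [pvResume]
  split <;> simp_all

theorem resume_cons_eof (p : List Char) (i : Nat) (r : Bool) (rest : List Bool)
    (h : pvGB p i r = PvGRes.eof) : pvResume p i (r :: rest) = false := by
  rw [pvResume]
  split <;> simp_all

theorem resume_cons_closed (p : List Char) (i j : Nat) (r prop : Bool) (rest : List Bool)
    (h : pvGB p i r = PvGRes.closed j prop) :
    pvResume p i (r :: rest) = pvResume p j (pvOrTop prop rest) := by
  rw [pvResume]
  split
  · simp_all
  · simp_all
  · rename_i j' prop' hg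
    rw [h] at hg
    injection hg with hg1 hg2
    rw [hg1, hg2]

theorem resume_head (p : List Char) (i i' : Nat) (r r' : Bool) (rest : List Bool)
    (h : pvGB p i r = pvGB p i' r') :
    pvResume p i (r :: rest) = pvResume p i' (r' :: rest) := by
  cases hV : pvGB p i r with
  | found =>
    rw [resume_cons_found p i r rest hV, resume_cons_found p i' r' rest (by rw [← h, hV])]
  | eof =>
    rw [resume_cons_eof p i r rest hV, resume_cons_eof p i' r' rest (by rw [← h, hV])]
  | closed j b =>
    rw [resume_cons_closed p i j r b rest hV,
      resume_cons_closed p i' j r' b rest (by rw [← h, hV])]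

theorem resume_eof (p : List Char) (i : Nat) (s : List Bool) (h : ¬ i < p.length) :
    pvResume p i s = false := by
  cases s with
  | nil => rw [resume_nil]; exact tB_eof p i h
  | cons r rest => exact resume_cons_eof p i r rest (gB_eof p i r h)

theorem resume_bs (p : List Char) (i : Nat) (s : List Bool) (hi : i < p.length)
    (hc : p.getD i ' ' = '\\') : pvResume p i s = pvResume p (i + 2) s := by
  cases s with
  | nil => rw [resume_nil, resume_nil]; exact tB_bs p i hi hc
  | cons r rest => exact resume_head p i (i + 2) r r rest (gB_bs p i r hi hc)

theorem resume_class (p : List Char) (i : Nat) (s : List Bool) (hi : i < p.length)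
    (hc : p.getD i ' ' = '[') :
    pvResume p i s = pvResume p (pvClassEndA p (p.length + 1) (i + 1)) s := by
  rw [← pvSkipClassB_eq]
  cases s with
  | nil => rw [resume_nil, resume_nil]; exact tB_class p i hi hc
  | cons r rest => exact resume_head p i _ r r rest (gB_class p i r hi hc)

theorem resume_open (p : List Char) (i js : Nat) (s : List Bool) (hi : i < p.length)
    (hc : p.getD i ' ' = '(')
    (hjs : js = if i + 1 < p.length ∧ p.getD (i + 1) ' ' = '?' then i + 2 else i + 1) :
    pvResume p i s = pvResume p js (false :: s) := by
  cases s with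
  | nil =>
    rw [resume_nil, tB_open p i js hi hc hjs]
    cases hV : pvGB p js false with
    | found => rw [resume_cons_found p js false [] hV]
    | eof => rw [resume_cons_eof p js false [] hV]
    | closed j b =>
      rw [resume_cons_closed p js j false b [] hV]
      rw [show pvOrTop b [] = [] from rfl, resume_nil]
  | cons r rest =>
    cases hV : pvGB p js false with
    | found =>
      rw [resume_cons_found p js false (r :: rest) hV]
      refine resume_cons_found p i r rest ?_
      rw [gB_open p i js r hi hc hjs, hV]
    | eof =>
      rw [resume_cons_eof p js false (r :: rest) hV]
      refine resume_cons_eof p i r rest ?_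
      rw [gB_open p i js r hi hc hjs, hV]
    | closed j b =>
      rw [resume_cons_closed p js j false b (r :: rest) hV]
      show pvResume p i (r :: rest) = pvResume p j ((r || b) :: rest)
      refine resume_head p i j r (r || b) rest ?_
      rw [gB_open p i js r hi hc hjs, hV]

theorem resume_other (p : List Char) (i : Nat) (s : List Bool) (hi : i < p.length)
    (h1 : p.getD i ' ' ≠ '\\') (h2 : p.getD i ' ' ≠ '[') (h3 : p.getD i ' ' ≠ '(')
    (h4 : p.getD i ' ' ≠ ')') :
    pvResume p i s =
      pvResume p ((pvQAfterA p i).getD (i + 1)) (pvOrTop (pvQAfterA p i).isSome s) := by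
  rw [← pvQuantEndB_eq]
  cases s with
  | nil =>
    rw [resume_nil, show pvOrTop (pvQuantEndB p i).isSome ([] : List Bool) = [] from rfl,
      resume_nil]
    exact tB_other p i hi h1 h2 h3 h4
  | cons r rest =>
    show pvResume p i (r :: rest) =
      pvResume p ((pvQuantEndB p i).getD (i + 1)) ((r || (pvQuantEndB p i).isSome) :: rest)
    exact resume_head p i ((pvQuantEndB p i).getD (i + 1)) r (r || (pvQuantEndB p i).isSome)
      rest (gB_other p i r hi h1 h2 h3 h4)

-- A's explicit-stack loop from any state equals B's resumed recursion
theorem loopA_eq_resume (p : List Char) :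
    ∀ f i (s : List Bool) (ign : PySem.Set Nat), p.length - i < f →
      (∀ x ∈ ign, x < i) → pvLoopA p f i s ign = pvResume p i s := by
  intro f
  induction f using Nat.strong_induction_on with
  | _ f ih =>
    intro i s ign hf hcl
    obtain ⟨f2, rfl⟩ : ∃ f2, f = f2 + 1 := ⟨f - 1, by omega⟩
    rw [pvLoopA.eq_def]
    try dsimp only []
    by_cases hi : i < p.length
    case neg =>
      rw [if_neg hi]
      exact (resume_eof p i s hi).symm
    case pos =>
    have hmem : PySem.Set.contains ign i = false := by
      rcases Bool.eq_false_or_eq_true (PySem.Set.contains ign i) with h | h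
      · exact absurd (hcl i ((PySem.Set.contains_iff ign i).1 h)) (by omega)
      · exact h
    rw [if_pos hi, if_neg (by rw [hmem]; exact Bool.false_ne_true)]
    try dsimp only []
    by_cases hbs : p.getD i ' ' = '\\'
    · rw [if_pos hbs, ih f2 (by omega) (i + 2) s ign (by omega)
        (fun x hx => by have := hcl x hx; omega)]
      exact (resume_bs p i s hi hbs).symm
    rw [if_neg hbs]
    by_cases hcl2 : p.getD i ' ' = '['
    · have hce := pvClassEndA_ge p (p.length + 1) (i + 1)
      rw [if_pos hcl2, ih f2 (by omega) (pvClassEndA p (p.length + 1) (i + 1)) s ign (by omega)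
        (fun x hx => by have := hcl x hx; omega)]
      exact (resume_class p i s hi hcl2).symm
    rw [if_neg hcl2]
    by_cases hop : p.getD i ' ' = '('
    · rw [if_pos hop]
      by_cases hq7 : i + 1 < p.length ∧ p.getD (i + 1) ' ' = '?'
      · obtain ⟨f3, rfl⟩ : ∃ f3, f2 = f3 + 1 := ⟨f2 - 1, by omega⟩
        rw [if_pos hq7, pvLoopA.eq_def]
        try dsimp only []
        rw [if_pos hq7.1,
          if_pos ((PySem.Set.contains_iff (PySem.Set.add ign (i + 1)) (i + 1)).2
            ((PySem.Set.mem_add ign (i + 1) (i + 1)).2 (Or.inr rfl))),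
          ih f3 (by omega) (i + 2) (false :: s) (PySem.Set.add ign (i + 1)) (by omega)
            (fun x hx => by
              rcases (PySem.Set.mem_add ign (i + 1) x).1 hx with h | h
              · have := hcl x h; omega
              · omega)]
        exact (resume_open p i (i + 2) s hi hop (by rw [if_pos hq7])).symm
      · rw [if_neg hq7, ih f2 (by omega) (i + 1) (false :: s) ign (by omega)
          (fun x hx => by have := hcl x hx; omega)]
        exact (resume_open p i (i + 1) s hi hop (by rw [if_neg hq7])).symm
    rw [if_neg hop]
    by_cases hcp : p.getD i ' ' = ')'
    · rw [if_pos hcp]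
      cases s with
      | nil =>
        rw [ih f2 (by omega) (i + 1) [] ign (by omega) (fun x hx => by have := hcl x hx; omega),
          resume_nil, resume_nil]
        exact (tB_close p i hi hcp).symm
      | cons top rest =>
        try dsimp only []
        by_cases hqt : ((pvQAfterA p (i + 1)).isSome && top) = true
        · rw [if_pos hqt]
          refine (resume_cons_found p i top rest ?_).symm
          have h1 : (pvQuantEndB p (i + 1)).isSome = true := by
            rw [pvQuantEndB_eq]; exact (Bool.and_eq_true_iff.1 hqt).1
          exact gB_close_found p i top hi hcp h1 (Bool.and_eq_true_iff.1 hqt).2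
        · rw [if_neg hqt]
          have hgt : i < (pvQAfterA p (i + 1)).getD (i + 1) :=
            pvQAfterA_getD_gt p i (i + 1) (i + 1) (by omega) (by omega)
          rw [ih f2 (by omega) ((pvQAfterA p (i + 1)).getD (i + 1)) _ ign (by omega)
            (fun x hx => by have := hcl x hx; omega)]
          refine Eq.symm ?_
          have hnq : ¬ (((pvQuantEndB p (i + 1)).isSome && top) = true) := by
            rw [pvQuantEndB_eq]; exact fun hh => hqt hh
          rw [resume_cons_closed p i ((pvQuantEndB p (i + 1)).getD (i + 1)) top
            (top || (pvQuantEndB p (i + 1)).isSome) rest (gB_close p i top hi hcp hnq),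
            pvQuantEndB_eq]
          congr 1
          cases rest with
          | nil => simp [pvOrTop]
          | cons r2 t =>
            rcases Bool.eq_false_or_eq_true top with ht | ht <;>
              rcases Bool.eq_false_or_eq_true (pvQAfterA p (i + 1)).isSome with hs | hs <;>
                simp [pvOrTop, ht, hs]
    rw [if_neg hcp]
    try dsimp only []
    by_cases hqs : (pvQAfterA p i).isSome = true
    · rw [if_pos hqs]
      cases hq' : pvQAfterA p i with
      | none => rw [hq'] at hqs; simp at hqs
      | some m =>
        have hm := pvQAfterA_gt p i m hq'
        simp only [Option.getD_some]
        rw [ih f2 (by omega) m _ ign (by omega) (fun x hx => by have := hcl x hx; omega)]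
        have hro := resume_other p i s hi hbs hcl2 hop hcp
        rw [hq'] at hro
        simp only [Option.isSome_some, Option.getD_some] at hro
        rw [hro]
        congr 1
        cases s with
        | nil => simp [pvOrTop]
        | cons r t => simp [pvOrTop]
    · rw [if_neg hqs]
      rw [ih f2 (by omega) (i + 1) s ign (by omega) (fun x hx => by have := hcl x hx; omega)]
      have hro := resume_other p i s hi hbs hcl2 hop hcp
      have hnone : pvQAfterA p i = none := by
        cases hq' : pvQAfterA p i with
        | none => rfl
        | some m => rw [hq'] at hqs; simp at hqs
      rw [hnone] at hro
      simp only [Option.isSome_none, Option.getD_none] at hro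
      rw [hro]
      congr 1
      cases s with
      | nil => simp [pvOrTop]
      | cons r t => simp [pvOrTop]

-- ===== VERDICT (by name: the statement is the Claim_ definition above) =====
theorem nested_repetition_detected_py_spec : Claim_equal_nested_repetition_detected_py := by
  intro pattern _hD
  unfold Spec_nested_repetition_detected_py
  unfold nested_repetition_detected_py nested_repetition_detected_py_alt
  have h := loopA_eq_resume pattern.toList (pattern.toList.length + 1) 0 [] PySem.Set.empty
    (by omega) (by intro x hx; simp [PySem.Set.empty] at hx)
  rw [h, resume_nil]
  rfl
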